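-- pv_equiv track=rewrite | github.com/sloppynacho/Py4GW | Py4GWCoreLib/native_src/internals/string_table.py | _parse_number_codepoints
-- ===== SOURCE A (Python) =====
-- _BASE = 0x0100
--
-- _MORE = 0x8000
--
-- _RANGE = _MORE - _BASE  # 0x7F00
--
-- def _parse_number_codepoints(codepoints: tuple[int, ...], start: int) -> tuple[int, int]:
--     """Parse one inline numeric argument encoded with base-0x7F00 digits."""
--     n = len(codepoints)
--     i = start
--     value = 0
--     parsed_any = False
--
--     while i < n:
--         cp = codepoints[i]
--         if cp == 0 or cp == 1 or cp == 2:
--             break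
--         digit = (cp & 0x7FFF) - _BASE
--         if digit < 0:
--             break
--         parsed_any = True
--         if cp & _MORE:
--             value = (value + digit) * _RANGE
--         else:
--             value = value + digit
--             i += 1
--             break
--         i += 1
--
--     if not parsed_any:
--         return 0, i
--
--     if i < n and codepoints[i] == 1:
--         i += 1
--
--     return value, i
-- ===== SOURCE B (Python) =====
-- def _parse_number_codepoints(codepoints, start):
--     """Parse one inline numeric argument encoded with base-0x7F00 digits."""
--     n = len(codepoints)
--
--     # Pass 1: collect the digit run as (digit, is_more) entries, tracking the end index.
--     entries = []
--     i = start
--     while i < n: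
--         cp = codepoints[i]
--         if cp in (0, 1, 2):
--             break
--         d = (cp & 0x7FFF) - 0x0100
--         if d < 0:
--             break
--         more = bool(cp & 0x8000)
--         entries.append((d, more))
--         i += 1
--         if not more:
--             break
--
--     if not entries:
--         return 0, i
--
--     # Pass 2: weighted sum right-to-left — each 'more' digit bumps the scale by 0x7F00.
--     value = 0
--     scale = 1
--     for d, more in reversed(entries):
--         if more:
--             scale *= 0x7F00
--         value += d * scale
--
--     if i < n and codepoints[i] == 1:
--         i += 1
--     return value, i
-- ===== Notes on version B (the rewrite author's own statement) =====
-- stated objective: alternative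
-- what changed: A's single while-loop threading a Horner accumulator (value=(value+digit)*0x7F00 in place) is replaced by two passes: collect the digit run as (digit, is_more) entries, then evaluate the base-0x7F00 polynomial right-to-left over the reversed entries with an explicit scale variable.
import Mathlib
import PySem

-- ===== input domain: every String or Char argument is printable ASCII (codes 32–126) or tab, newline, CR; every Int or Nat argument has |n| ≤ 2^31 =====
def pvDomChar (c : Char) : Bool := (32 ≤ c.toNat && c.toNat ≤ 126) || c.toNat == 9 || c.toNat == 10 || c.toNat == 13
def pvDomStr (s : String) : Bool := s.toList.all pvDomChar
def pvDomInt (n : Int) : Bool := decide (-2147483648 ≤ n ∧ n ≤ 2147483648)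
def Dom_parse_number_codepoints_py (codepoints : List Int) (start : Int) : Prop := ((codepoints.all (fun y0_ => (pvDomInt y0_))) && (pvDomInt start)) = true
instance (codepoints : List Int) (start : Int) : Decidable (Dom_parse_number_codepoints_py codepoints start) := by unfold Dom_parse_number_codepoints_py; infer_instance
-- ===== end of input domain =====

-- B replaces A's single Horner-accumulator while-loop by two passes: collect the
-- (digit, is_more) run, then a reversed scale-weighted sum; same O(n) cost (objective: alternative).

-- ===== PORT A =====
-- A's while loop; state (i, value, parsed_any); fuel = (n - i).toNat (while i < n).
-- `pyGet? = none` (Python IndexError) exits the loop; such inputs are outside Pre_.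
def pvALoop (cps : List Int) (fuel : Nat) (i : Int) (value : Int) (pa : Bool) :
    Int × Int × Bool :=
  match fuel with
  | 0 => (value, i, pa)
  | fuel + 1 =>
    match PySem.List.pyGet? cps i with
    | none => (value, i, pa)
    | some cp =>
      if cp = 0 ∨ cp = 1 ∨ cp = 2 then (value, i, pa)
      else
        let digit := (Int.land cp 0x7FFF) - 0x0100
        if digit < 0 then (value, i, pa)
        else if Int.land cp 0x8000 ≠ 0 then
          pvALoop cps fuel (i + 1) ((value + digit) * 0x7F00) true
        else (value + digit, i + 1, true)

def parse_number_codepoints_py (codepoints : List Int) (start : Int) : Int × Int :=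
  let n : Int := codepoints.length
  let r := pvALoop codepoints (n - start).toNat start 0 false
  let value := r.1
  let i := r.2.1
  let pa := r.2.2
  if pa = false then (0, i)
  else if i < n ∧ PySem.List.pyGet? codepoints i = some 1 then (value, i + 1)
  else (value, i)

-- ===== PORT B =====
-- B pass 1: collect the digit run as (digit, is_more) entries plus the end index;
-- fuel = (n - i).toNat (while i < n); pyGet? = none (IndexError) is outside Pre_.
def pvBCollect (cps : List Int) (fuel : Nat) (i : Int) : List (Int × Bool) × Int :=
  match fuel with
  | 0 => ([], i)
  | fuel + 1 =>
    match PySem.List.pyGet? cps i with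
    | none => ([], i)
    | some cp =>
      if cp = 0 ∨ cp = 1 ∨ cp = 2 then ([], i)
      else
        let d := (Int.land cp 0x7FFF) - 0x0100
        if d < 0 then ([], i)
        else if Int.land cp 0x8000 ≠ 0 then
          let r := pvBCollect cps fuel (i + 1)
          ((d, true) :: r.1, r.2)
        else ([(d, false)], i + 1)

-- B pass 2: the reversed-order loop over the entries, state (value, scale).
def pvBFold : List (Int × Bool) → Int × Int → Int × Int
  | [], vs => vs
  | (d, more) :: rest, (value, scale) =>
    let scale := if more then scale * 0x7F00 else scale
    pvBFold rest (value + d * scale, scale)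

def parse_number_codepoints_py_alt (codepoints : List Int) (start : Int) : Int × Int :=
  let n : Int := codepoints.length
  let c := pvBCollect codepoints (n - start).toNat start
  let entries := c.1
  let i := c.2
  if entries = [] then (0, i)
  else
    let value := (pvBFold entries.reverse (0, 1)).1
    if i < n ∧ PySem.List.pyGet? codepoints i = some 1 then (value, i + 1)
    else (value, i)

-- ===== PRECONDITION & SPEC =====
-- Pre_ excludes exactly the inputs where Python A raises IndexError (start < -len(codepoints));
-- B raises there too.
def Pre_parse_number_codepoints_py (codepoints : List Int) (start : Int) : Prop :=
  -(codepoints.length : Int) ≤ start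
instance (codepoints : List Int) (start : Int) : Decidable (Pre_parse_number_codepoints_py codepoints start) := by unfold Pre_parse_number_codepoints_py; infer_instance

def pvWitness_parse_number_codepoints_py : List Int × Int := ([0x8105, 0x0203], 0)

def Spec_parse_number_codepoints_py (codepoints : List Int) (start : Int) (out : Int × Int) : Prop := out = parse_number_codepoints_py_alt codepoints start
instance (codepoints : List Int) (start : Int) (out : Int × Int) : Decidable (Spec_parse_number_codepoints_py codepoints start out) := by unfold Spec_parse_number_codepoints_py; infer_instance

-- ===== CLAIM (what is proved, stated in full; the proofs are below) =====
def Claim_equal_parse_number_codepoints_py : Prop := ∀ (codepoints : List Int) (start : Int), Dom_parse_number_codepoints_py codepoints start → Pre_parse_number_codepoints_py codepoints start → Spec_parse_number_codepoints_py codepoints start (parse_number_codepoints_py codepoints start)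

-- ===== LEMMAS AND PROOFS =====

theorem pvBFold_append (xs ys : List (Int × Bool)) (vs : Int × Int) :
    pvBFold (xs ++ ys) vs = pvBFold ys (pvBFold xs vs) := by
  induction xs generalizing vs with
  | nil => rfl
  | cons p rest ih =>
    obtain ⟨d, more⟩ := p
    obtain ⟨v, sc⟩ := vs
    simp [pvBFold, ih]

theorem pvLoop_eq_collect_fold (cps : List Int) (fuel : Nat) :
    ∀ (i a : Int) (pa : Bool),
      pvALoop cps fuel i a pa =
        (a * (pvBFold (pvBCollect cps fuel i).1.reverse (0, 1)).2
           + (pvBFold (pvBCollect cps fuel i).1.reverse (0, 1)).1,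
         (pvBCollect cps fuel i).2,
         pa || !(pvBCollect cps fuel i).1.isEmpty) := by
  induction fuel with
  | zero => intro i a pa; simp [pvALoop, pvBCollect, pvBFold]
  | succ f ih =>
    intro i a pa
    simp only [pvALoop, pvBCollect]
    cases h : PySem.List.pyGet? cps i with
    | none => simp [pvBFold]
    | some cp =>
      by_cases h012 : cp = 0 ∨ cp = 1 ∨ cp = 2
      · simp [h012, pvBFold]
      · by_cases hneg : Int.land cp 0x7FFF - 0x0100 < 0
        · simp [h012, hneg, pvBFold]
        · by_cases hmore : Int.land cp 0x8000 = 0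
          · simp [h012, hneg, hmore, pvBFold]
          · simp [h012, hneg, hmore, ih, pvBFold_append, pvBFold, Prod.ext_iff]
            ring

-- ===== VERDICT (by name: the statement is the Claim_ definition above) =====
theorem parse_number_codepoints_py_spec : Claim_equal_parse_number_codepoints_py := by
  intro codepoints start _ _
  unfold Spec_parse_number_codepoints_py parse_number_codepoints_py parse_number_codepoints_py_alt
  simp only [pvLoop_eq_collect_fold, zero_mul, zero_add, Bool.false_or]
  cases he : (pvBCollect codepoints ((codepoints.length : Int) - start).toNat start).1 with
  | nil => simp
  | cons p rest => simp
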